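-- pv_equiv track=rewrite | github.com/piaoyangguo/serviceunit | app/matcher.py | match_sentence
-- ===== SOURCE A (Python) =====
-- def match_sentence(time_word, word_list, query, search_before=True, search_after=False):
--     idx = query.find(time_word)
--     if idx == -1:
--         return False
--
--     for standard in word_list:
--         if search_before and standard + time_word in query:
--             return True
--         if search_after and time_word + standard in query:
--             return True
--     return False
-- ===== SOURCE B (Python) =====
-- def match_sentence(time_word, word_list, query, search_before=True, search_after=False):
--     n, m = len(query), len(time_word)
--     words = set(word_list)
--     lengths = {len(w) for w in words}
--     for i in range(n - m + 1):
--         if query[i:i + m] != time_word: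
--             continue
--         for L in lengths:
--             if search_before and L <= i and query[i - L:i] in words:
--                 return True
--             if search_after and i + m + L <= n and query[i + m:i + m + L] in words:
--                 return True
--     return False
-- ===== Notes on version B (the rewrite author's own statement) =====
-- stated objective: alternative
-- what changed: Instead of testing each word's concatenation with time_word as a substring of query, B scans query once for the occurrence positions of time_word and checks the adjacent slice of each distinct word length against a set of the words.
import Mathlib
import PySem

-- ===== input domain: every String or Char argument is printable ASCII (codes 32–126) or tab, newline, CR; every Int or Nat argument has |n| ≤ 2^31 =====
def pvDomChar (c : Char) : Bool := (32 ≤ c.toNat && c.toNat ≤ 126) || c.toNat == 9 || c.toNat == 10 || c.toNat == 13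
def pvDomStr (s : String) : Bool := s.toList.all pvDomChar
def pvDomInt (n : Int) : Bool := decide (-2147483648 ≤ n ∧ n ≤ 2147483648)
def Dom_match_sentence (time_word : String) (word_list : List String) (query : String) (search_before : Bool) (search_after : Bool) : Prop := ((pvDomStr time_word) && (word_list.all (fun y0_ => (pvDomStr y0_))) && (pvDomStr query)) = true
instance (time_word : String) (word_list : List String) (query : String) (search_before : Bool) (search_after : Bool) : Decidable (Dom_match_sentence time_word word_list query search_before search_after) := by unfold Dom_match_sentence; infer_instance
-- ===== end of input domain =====

-- B replaces A's per-word substring searches of the concatenations by one scan over the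
-- occurrence positions of time_word in query, testing the adjacent slice of each candidate
-- length against a set of the words (objective: alternative algorithm; same return value).

-- ===== PORT A =====
-- the 'for standard in word_list' loop with its two early returns
def msLoopA (twL qL : List Char) (sb sa : Bool) : List String → Bool
  | [] => false
  | w :: rest =>
    if sb && PySem.Chars.isIn (w.toList ++ twL) qL then true
    else if sa && PySem.Chars.isIn (twL ++ w.toList) qL then true
    else msLoopA twL qL sb sa rest

def match_sentence (time_word : String) (word_list : List String) (query : String) (search_before : Bool) (search_after : Bool) : Bool :=
  -- idx = query.find(time_word); if idx == -1: return False
  if PySem.Str.find query time_word = -1 then false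
  else msLoopA time_word.toList query.toList search_before search_after word_list

-- ===== PORT B =====
-- the inner 'for L in lengths' loop; slices query[i-L:i] and query[i+m:i+m+L] are
-- (drop …).take … — exact here since the guards L ≤ i and i+m+L ≤ n keep the bounds
-- non-negative and in range
def msInnerB (qL : List Char) (n m i : Nat) (words : List (List Char)) (sb sa : Bool) : List Nat → Bool
  | [] => false
  | L :: rest =>
    if sb && decide (L ≤ i) && decide ((qL.drop (i - L)).take L ∈ words) then true
    else if sa && decide (i + m + L ≤ n) && decide ((qL.drop (i + m)).take L ∈ words) then true
    else msInnerB qL n m i words sb sa rest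

-- the outer 'for i in range(n - m + 1)' loop; 'query[i:i+m] != time_word: continue'
def msScanB (twL qL : List Char) (n m : Nat) (words : List (List Char)) (lengths : List Nat) (sb sa : Bool) : List Nat → Bool
  | [] => false
  | i :: rest =>
    if (qL.drop i).take m ≠ twL then msScanB twL qL n m words lengths sb sa rest
    else if msInnerB qL n m i words sb sa lengths then true
    else msScanB twL qL n m words lengths sb sa rest

def match_sentence_alt (time_word : String) (word_list : List String) (query : String) (search_before : Bool) (search_after : Bool) : Bool :=
  let qL := query.toList
  let twL := time_word.toList
  let n := qL.length
  let m := twL.length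
  let words := PySem.Set.ofList (word_list.map (·.toList))   -- words = set(word_list)
  let lengths := PySem.Set.ofList (words.map List.length)    -- lengths = {len(w) for w in words}
  -- range(n - m + 1) in Python is empty when m > n; in Nat that is List.range (n + 1 - m)
  msScanB twL qL n m words lengths search_before search_after (List.range (n + 1 - m))

-- ===== PRECONDITION & SPEC =====
def Spec_match_sentence (time_word : String) (word_list : List String) (query : String) (search_before : Bool) (search_after : Bool) (out : Bool) : Prop := out = match_sentence_alt time_word word_list query search_before search_after
instance (time_word : String) (word_list : List String) (query : String) (search_before : Bool) (search_after : Bool) (out : Bool) : Decidable (Spec_match_sentence time_word word_list query search_before search_after out) := by unfold Spec_match_sentence; infer_instance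

-- ===== CLAIM (what is proved, stated in full; the proofs are below) =====
def Claim_equal_match_sentence : Prop := ∀ (time_word : String) (word_list : List String) (query : String) (search_before : Bool) (search_after : Bool), Dom_match_sentence time_word word_list query search_before search_after → Spec_match_sentence time_word word_list query search_before search_after (match_sentence time_word word_list query search_before search_after)

-- ===== LEMMAS AND PROOFS =====

-- A's loop returns true iff some word matches
lemma msLoopA_iff (twL qL : List Char) (sb sa : Bool) (wl : List String) :
    msLoopA twL qL sb sa wl = true ↔
      ∃ w ∈ wl, (sb = true ∧ (w.toList ++ twL) <:+: qL) ∨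
                (sa = true ∧ (twL ++ w.toList) <:+: qL) := by
  induction wl with
  | nil => simp [msLoopA]
  | cons w rest ih =>
    simp only [msLoopA, List.mem_cons]
    split_ifs with h1 h2
    · simp only [Bool.and_eq_true] at h1
      have := (PySem.Chars.isIn_iff_infix _ _).mp h1.2
      simp only [true_iff]
      exact ⟨w, Or.inl rfl, Or.inl ⟨h1.1, this⟩⟩
    · simp only [Bool.and_eq_true] at h2
      have := (PySem.Chars.isIn_iff_infix _ _).mp h2.2
      simp only [true_iff]
      exact ⟨w, Or.inl rfl, Or.inr ⟨h2.1, this⟩⟩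
    · rw [ih]
      constructor
      · rintro ⟨v, hv, h⟩; exact ⟨v, Or.inr hv, h⟩
      · rintro ⟨v, hv, h⟩
        rcases hv with rfl | hv
        · rcases h with ⟨hsb, hinf⟩ | ⟨hsa, hinf⟩
          · exact absurd (by simp [hsb, (PySem.Chars.isIn_iff_infix _ _).mpr hinf]) h1
          · exact absurd (by simp [hsa, (PySem.Chars.isIn_iff_infix _ _).mpr hinf]) h2
        · exact ⟨v, hv, h⟩

-- B's inner loop returns true iff some length matches
lemma msInnerB_iff (qL : List Char) (n m i : Nat) (words : List (List Char)) (sb sa : Bool) (Ls : List Nat) :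
    msInnerB qL n m i words sb sa Ls = true ↔
      ∃ L ∈ Ls, (sb = true ∧ L ≤ i ∧ (qL.drop (i - L)).take L ∈ words) ∨
                (sa = true ∧ i + m + L ≤ n ∧ (qL.drop (i + m)).take L ∈ words) := by
  induction Ls with
  | nil => simp [msInnerB]
  | cons L rest ih =>
    simp only [msInnerB, List.mem_cons]
    split_ifs with h1 h2
    · simp only [Bool.and_eq_true, decide_eq_true_eq] at h1
      simp only [true_iff]
      exact ⟨L, Or.inl rfl, Or.inl ⟨h1.1.1, h1.1.2, h1.2⟩⟩
    · simp only [Bool.and_eq_true, decide_eq_true_eq] at h2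
      simp only [true_iff]
      exact ⟨L, Or.inl rfl, Or.inr ⟨h2.1.1, h2.1.2, h2.2⟩⟩
    · rw [ih]
      constructor
      · rintro ⟨K, hK, h⟩; exact ⟨K, Or.inr hK, h⟩
      · rintro ⟨K, hK, h⟩
        rcases hK with rfl | hK
        · rcases h with ⟨hsb, hle, hmem⟩ | ⟨hsa, hle, hmem⟩
          · exact absurd (by simp [hsb, hle, hmem]) h1
          · exact absurd (by simp [hsa, hle, hmem]) h2
        · exact ⟨K, hK, h⟩

-- B's outer loop returns true iff some occurrence position matches
lemma msScanB_iff (twL qL : List Char) (n m : Nat) (words : List (List Char)) (lengths : List Nat) (sb sa : Bool) (is : List Nat) :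
    msScanB twL qL n m words lengths sb sa is = true ↔
      ∃ i ∈ is, (qL.drop i).take m = twL ∧ msInnerB qL n m i words sb sa lengths = true := by
  induction is with
  | nil => simp [msScanB]
  | cons i rest ih =>
    simp only [msScanB, List.mem_cons]
    split_ifs with h1 h2
    · rw [ih]
      constructor
      · rintro ⟨j, hj, h⟩; exact ⟨j, Or.inr hj, h⟩
      · rintro ⟨j, hj, h⟩
        rcases hj with rfl | hj
        · exact absurd h.1 h1
        · exact ⟨j, hj, h⟩
    · push_neg at h1
      simp only [true_iff]
      exact ⟨i, Or.inl rfl, h1, h2⟩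
    · push_neg at h1
      rw [ih]
      constructor
      · rintro ⟨j, hj, h⟩; exact ⟨j, Or.inr hj, h⟩
      · rintro ⟨j, hj, h⟩
        rcases hj with rfl | hj
        · exact absurd h.2 h2
        · exact ⟨j, hj, h⟩

-- the central equivalence of the two existential characterizations
lemma central (twL qL : List Char) (wl : List String) (sb sa : Bool) :
    (∃ w ∈ wl, (sb = true ∧ (w.toList ++ twL) <:+: qL) ∨
               (sa = true ∧ (twL ++ w.toList) <:+: qL)) ↔
    (∃ i ∈ List.range (qL.length + 1 - twL.length), (qL.drop i).take twL.length = twL ∧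
       ∃ L ∈ PySem.Set.ofList ((PySem.Set.ofList (wl.map (·.toList))).map List.length),
         (sb = true ∧ L ≤ i ∧ (qL.drop (i - L)).take L ∈ PySem.Set.ofList (wl.map (·.toList))) ∨
         (sa = true ∧ i + twL.length + L ≤ qL.length ∧ (qL.drop (i + twL.length)).take L ∈ PySem.Set.ofList (wl.map (·.toList)))) := by
  constructor
  · rintro ⟨w, hw, h⟩
    have hwmem : w.toList ∈ PySem.Set.ofList (wl.map (·.toList)) := by
      rw [PySem.Set.mem_ofList]; exact List.mem_map_of_mem hw
    have hLmem : w.toList.length ∈ PySem.Set.ofList ((PySem.Set.ofList (wl.map (·.toList))).map List.length) := by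
      rw [PySem.Set.mem_ofList]; exact List.mem_map_of_mem hwmem
    rcases h with ⟨hsb, s, t, hq⟩ | ⟨hsa, s, t, hq⟩
    · -- q = s ++ (w ++ tw) ++ t ; occurrence of tw at i = |s| + |w|
      have hlen : qL.length = s.length + w.toList.length + twL.length + t.length := by
        rw [← hq]; simp; omega
      have hq2 : (s ++ w.toList) ++ (twL ++ t) = qL := by rw [← hq]; simp
      have hdrop : qL.drop (s.length + w.toList.length) = twL ++ t := by
        rw [show s.length + w.toList.length = (s ++ w.toList).length from by simp,
            ← hq2, List.drop_left]
      have hq3 : s ++ (w.toList ++ (twL ++ t)) = qL := by rw [← hq]; simp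
      have hdrop2 : qL.drop s.length = w.toList ++ (twL ++ t) := by
        rw [← hq3, List.drop_left]
      refine ⟨s.length + w.toList.length, ?_, ?_, w.toList.length, hLmem,
        Or.inl ⟨hsb, Nat.le_add_left _ _, ?_⟩⟩
      · rw [List.mem_range]; omega
      · rw [hdrop, List.take_left]
      · rw [show s.length + w.toList.length - w.toList.length = s.length from by omega,
            hdrop2, List.take_left]
        exact hwmem
    · -- q = s ++ (tw ++ w) ++ t ; occurrence of tw at i = |s|
      have hlen : qL.length = s.length + twL.length + w.toList.length + t.length := by
        rw [← hq]; simp; omega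
      have hq2 : s ++ (twL ++ (w.toList ++ t)) = qL := by rw [← hq]; simp
      have hdrop : qL.drop s.length = twL ++ (w.toList ++ t) := by
        rw [← hq2, List.drop_left]
      have hq3 : (s ++ twL) ++ (w.toList ++ t) = qL := by rw [← hq]; simp
      have hdrop2 : qL.drop (s.length + twL.length) = w.toList ++ t := by
        rw [show s.length + twL.length = (s ++ twL).length from by simp,
            ← hq3, List.drop_left]
      refine ⟨s.length, ?_, ?_, w.toList.length, hLmem, Or.inr ⟨hsa, ?_, ?_⟩⟩
      · rw [List.mem_range]; omega
      · rw [hdrop, List.take_left]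
      · omega
      · rw [hdrop2, List.take_left]
        exact hwmem
  · rintro ⟨i, hi, htw, L, hL, h⟩
    have hdi : qL.drop i = twL ++ (qL.drop i).drop twL.length := by
      conv_lhs => rw [← List.take_append_drop twL.length (qL.drop i)]
      rw [htw]
    rcases h with ⟨hsb, hLi, hmem⟩ | ⟨hsa, hle, hmem⟩
    · rw [PySem.Set.mem_ofList, List.mem_map] at hmem
      obtain ⟨w, hw, hweq⟩ := hmem
      refine ⟨w, hw, Or.inl ⟨hsb, ?_⟩⟩
      have hdiL : qL.drop (i - L) =
          (qL.drop (i - L)).take L ++ qL.drop i := by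
        conv_lhs => rw [← List.take_append_drop L (qL.drop (i - L))]
        rw [List.drop_drop, show i - L + L = i from by omega]
      refine ⟨qL.take (i - L), (qL.drop i).drop twL.length, ?_⟩
      rw [hweq]
      conv_rhs => rw [← List.take_append_drop (i - L) qL, hdiL, hdi]
      simp [List.append_assoc]
    · rw [PySem.Set.mem_ofList, List.mem_map] at hmem
      obtain ⟨w, hw, hweq⟩ := hmem
      refine ⟨w, hw, Or.inr ⟨hsa, ?_⟩⟩
      have hdm : (qL.drop i).drop twL.length = qL.drop (i + twL.length) := by
        rw [List.drop_drop]
      have hdiL : qL.drop (i + twL.length) =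
          (qL.drop (i + twL.length)).take L ++ qL.drop (i + twL.length + L) := by
        conv_lhs => rw [← List.take_append_drop L (qL.drop (i + twL.length))]
        rw [List.drop_drop]
      refine ⟨qL.take i, qL.drop (i + twL.length + L), ?_⟩
      rw [hweq]
      conv_rhs => rw [← List.take_append_drop i qL, hdi, hdm, hdiL]
      simp [List.append_assoc]

-- an existing match forces time_word to occur in query, absorbing A's find-guard
lemma exists_match_infix (twL qL : List Char) (wl : List String) (sb sa : Bool)
    (h : ∃ w ∈ wl, (sb = true ∧ (w.toList ++ twL) <:+: qL) ∨
                   (sa = true ∧ (twL ++ w.toList) <:+: qL)) : twL <:+: qL := by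
  obtain ⟨w, _, h⟩ := h
  rcases h with ⟨_, hinf⟩ | ⟨_, hinf⟩
  · exact ((List.suffix_append w.toList twL).isInfix.trans hinf)
  · exact ((List.prefix_append twL w.toList).isInfix.trans hinf)

-- ===== VERDICT (by name: the statement is the Claim_ definition above) =====
theorem match_sentence_spec : Claim_equal_match_sentence := by
  intro tw wl q sb sa _
  unfold Spec_match_sentence match_sentence match_sentence_alt
  simp only []
  rw [Bool.eq_iff_iff]
  rw [msScanB_iff]
  constructor
  · intro h
    by_cases hf : PySem.Str.find q tw = -1
    · rw [if_pos hf] at h; exact absurd h Bool.false_ne_true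
    · rw [if_neg hf] at h
      have := (msLoopA_iff _ _ _ _ _).mp h
      have := (central tw.toList q.toList wl sb sa).mp this
      obtain ⟨i, hi, htw, L, hL, hc⟩ := this
      exact ⟨i, hi, htw, (msInnerB_iff _ _ _ _ _ _ _ _).mpr ⟨L, hL, hc⟩⟩
  · rintro ⟨i, hi, htw, hin⟩
    have hQ : ∃ w ∈ wl, (sb = true ∧ (w.toList ++ tw.toList) <:+: q.toList) ∨
                        (sa = true ∧ (tw.toList ++ w.toList) <:+: q.toList) := by
      apply (central tw.toList q.toList wl sb sa).mpr
      exact ⟨i, hi, htw, (msInnerB_iff _ _ _ _ _ _ _ _).mp hin⟩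
    have hinf := exists_match_infix tw.toList q.toList wl sb sa hQ
    have hfind : ¬ PySem.Str.find q tw = -1 := by
      rw [PySem.Str.find_eq_neg_one_iff]; exact fun hc => hc hinf
    rw [if_neg hfind]
    exact (msLoopA_iff _ _ _ _ _).mpr hQ
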